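-- pv_equiv track=rewrite | github.com/imjinshuo/RulER | scripts/RQ3/utils.py | integrate_diff_id
-- ===== SOURCE A (Python) =====
-- def integrate_diff_id(match_diff_list):
--     max_len = 0
--     for diff_id_list in match_diff_list:
--         if diff_id_list and diff_id_list[0] > max_len:
--             max_len = diff_id_list[0]
--     ids = []
--     for diff_id_list in match_diff_list:
--         if diff_id_list and diff_id_list[0] == max_len:
--             ids.extend(diff_id_list[1])
--     ids.sort()
--     if ids:
--         return ids[0]
--     else:
--         return -1
-- ===== SOURCE B (Python) =====
-- def integrate_diff_id(match_diff_list):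
--     # One pass: group the id-lists by their first element while tracking the
--     # (0-floored) running maximum of the first elements; then flatten the
--     # selected group and take its minimum directly (no sort, no second scan).
--     groups = {}
--     max_len = 0
--     for first, id_list in match_diff_list:
--         groups.setdefault(first, []).append(id_list)
--         if first > max_len:
--             max_len = first
--     ids = [i for lst in groups.get(max_len, []) for i in lst]
--     return min(ids) if ids else -1
-- ===== Notes on version B (the rewrite author's own statement) =====
-- stated objective: alternative
-- what changed: Replaces A's two scans plus full sort with a single pass that groups id-lists in a dict keyed by the first element while tracking the running maximum, then flattens only the maximal group and takes min() instead of sorting.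
import Mathlib
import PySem

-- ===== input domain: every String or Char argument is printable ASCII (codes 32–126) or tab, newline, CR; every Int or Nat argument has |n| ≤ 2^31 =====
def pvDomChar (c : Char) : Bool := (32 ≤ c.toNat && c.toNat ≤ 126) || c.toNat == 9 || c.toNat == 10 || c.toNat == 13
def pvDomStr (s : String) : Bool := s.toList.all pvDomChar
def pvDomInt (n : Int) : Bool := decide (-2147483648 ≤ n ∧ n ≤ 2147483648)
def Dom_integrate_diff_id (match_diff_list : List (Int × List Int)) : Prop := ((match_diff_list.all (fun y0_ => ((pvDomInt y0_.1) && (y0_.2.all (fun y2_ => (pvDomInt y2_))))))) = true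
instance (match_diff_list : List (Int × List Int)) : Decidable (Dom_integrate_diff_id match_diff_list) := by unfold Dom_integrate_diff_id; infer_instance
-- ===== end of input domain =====

-- B replaces A's two scans + sort with one dict-grouping pass and min(); objective: alternative (same cost class).

-- ===== PORT A =====
-- 'if diff_id_list and …': each element is a 2-tuple, which is always truthy, so the test is just the comparison.
def integrate_diff_id (match_diff_list : List (Int × List Int)) : Int :=
  let max_len : Int := match_diff_list.foldl
    (fun max_len diff_id_list => if diff_id_list.1 > max_len then diff_id_list.1 else max_len) 0
  let ids : List Int := match_diff_list.foldl
    (fun ids diff_id_list => if diff_id_list.1 == max_len then ids ++ diff_id_list.2 else ids) []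
  let ids := PySem.List.sorted ids (fun x => x) false
  match ids with
  | x :: _ => x
  | [] => -1

-- ===== PORT B =====
def integrate_diff_id_alt (match_diff_list : List (Int × List Int)) : Int :=
  let st := match_diff_list.foldl
    (fun (s : PySem.Dict Int (List (List Int)) × Int) p =>
      (s.1.modify p.1 [] (· ++ [p.2]), if p.1 > s.2 then p.1 else s.2))
    (PySem.Dict.empty, 0)
  let ids : List Int := (st.1.getD st.2 []).flatten
  match PySem.List.min? ids (fun x => x) with
  | some m => m
  | none => -1

-- ===== PRECONDITION & SPEC =====
def Spec_integrate_diff_id (match_diff_list : List (Int × List Int)) (out : Int) : Prop := out = integrate_diff_id_alt match_diff_list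
instance (match_diff_list : List (Int × List Int)) (out : Int) : Decidable (Spec_integrate_diff_id match_diff_list out) := by unfold Spec_integrate_diff_id; infer_instance

-- ===== CLAIM (what is proved, stated in full; the proofs are below) =====
def Claim_equal_integrate_diff_id : Prop := ∀ (match_diff_list : List (Int × List Int)), Dom_integrate_diff_id match_diff_list → Spec_integrate_diff_id match_diff_list (integrate_diff_id match_diff_list)

-- ===== LEMMAS AND PROOFS =====

-- Both programs reduce to min over the same flat list of ids.
theorem ids_eq (l : List (Int × List Int)) (M : Int) :
    l.foldl (fun ids p => if p.1 == M then ids ++ p.2 else ids) [] =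
      (((List.foldl (fun d p => PySem.Dict.modify d p.1 [] (· ++ [p.2]))
          (PySem.Dict.empty) l).getD M []).flatten) := by
  have h1 := PySem.List.foldl_if_eq_foldl_filter (fun q : Int × List Int => q.1 == M)
    (fun ids q => ids ++ q.2) l []
  simp only at h1
  rw [h1, PySem.List.foldl_append_eq_flatMap, PySem.Dict.getD_foldl_modify_append]
  simp [List.flatMap_def]

-- head of sorted = first minimum (as a value).
theorem head_sorted_eq_min (ids : List Int) :
    (match PySem.List.sorted ids (fun x => x) false with
      | x :: _ => x
      | [] => (-1 : Int)) =
    (match PySem.List.min? ids (fun x => x) with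
      | some m => m
      | none => (-1 : Int)) := by
  cases hs : PySem.List.sorted ids (fun x => x) false with
  | nil =>
      have : ids = [] := (PySem.List.sorted_eq_nil_iff _ _ _).mp hs
      subst this
      simp [PySem.List.min?]
  | cons x t =>
      have hids : ids ≠ [] := by
        intro h; subst h; simp [PySem.List.sorted] at hs
      cases hm : PySem.List.min? ids (fun y => y) with
      | none => exact absurd ((PySem.List.min?_eq_none_iff _ _).mp hm) hids
      | some m =>
          have hxmem : x ∈ ids := by
            have : x ∈ PySem.List.sorted ids (fun y => y) false := by rw [hs]; exact List.mem_cons_self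
            exact (PySem.List.mem_sorted _ _ _ _).mp this
          have h1 : m ≤ x := PySem.List.min?_isMin hm x hxmem
          have h2 : x ≤ m := PySem.List.key_head_sorted_le _ (fun y => y) hs m (PySem.List.min?_mem hm)
          exact le_antisymm h2 h1

theorem integrate_spec_aux (l : List (Int × List Int)) :
    integrate_diff_id l = integrate_diff_id_alt l := by
  unfold integrate_diff_id integrate_diff_id_alt
  rw [PySem.List.foldl_prod_mk
        (f := fun d (p : Int × List Int) => PySem.Dict.modify d p.1 [] (· ++ [p.2]))
        (g := fun m (p : Int × List Int) => if p.1 > m then p.1 else m)]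
  simp only []
  rw [← ids_eq l (l.foldl (fun m p => if p.1 > m then p.1 else m) 0)]
  exact head_sorted_eq_min _

-- ===== VERDICT (by name: the statement is the Claim_ definition above) =====
theorem integrate_diff_id_spec : Claim_equal_integrate_diff_id := by
  intro l _
  unfold Spec_integrate_diff_id
  exact integrate_spec_aux l
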